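-- pv_equiv track=rewrite | github.com/Ake7000/Football-Statistics-Predictor | data_vis_scripts/find_common_max_rectangles.py | counts_for_all_windows
-- ===== SOURCE A (Python) =====
-- from typing import List, Dict, Tuple, Optional
--
-- def counts_for_all_windows(bool_matrix: List[List[int]]) -> List[List[int]]:
--     """
--     For each window [l..r] over columns, return the count of rows that are all-ones in that window.
--     Complexity: O(R*C^2) — fine for our sizes.
--     """
--     if not bool_matrix:
--         return []
--     R = len(bool_matrix)
--     C = len(bool_matrix[0])
--     counts = [[0]*C for _ in range(C)]
--     for l in range(C):
--         active = [1]*R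
--         for r in range(l, C):
--             for i in range(R):
--                 active[i] = 1 if (active[i] and bool_matrix[i][r]) else 0
--             counts[l][r] = sum(active)
--     return counts
-- ===== SOURCE B (Python) =====
-- def counts_for_all_windows(bool_matrix):
--     """
--     One sweep over columns: per-row run lengths of consecutive nonzeros ending at
--     column r, a histogram of those run lengths, and a suffix sum of the histogram
--     give counts[l][r] for all l at once.  O(R*C + C^2) instead of O(R*C^2).
--     """
--     if not bool_matrix:
--         return []
--     R = len(bool_matrix)
--     C = len(bool_matrix[0])
--     counts = [[0] * C for _ in range(C)]
--     streak = [0] * R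
--     for r in range(C):
--         streak = [s + 1 if row[r] else 0 for s, row in zip(streak, bool_matrix)]
--         hist = [0] * (r + 2)
--         for s in streak:
--             hist[s] += 1
--         suf = 0
--         for l in range(r + 1):
--             suf += hist[r + 1 - l]
--             counts[l][r] = suf
--     return counts
-- ===== Notes on version B (the rewrite author's own statement) =====
-- stated objective: faster
-- what changed: Instead of restarting an all-ones mask for every left endpoint l (O(R*C^2)), B sweeps the columns once, maintaining per-row lengths of the nonzero run ending at column r; a histogram of those run lengths plus one suffix-sum pass yields counts[l][r] for every l at once.
import Mathlib
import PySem

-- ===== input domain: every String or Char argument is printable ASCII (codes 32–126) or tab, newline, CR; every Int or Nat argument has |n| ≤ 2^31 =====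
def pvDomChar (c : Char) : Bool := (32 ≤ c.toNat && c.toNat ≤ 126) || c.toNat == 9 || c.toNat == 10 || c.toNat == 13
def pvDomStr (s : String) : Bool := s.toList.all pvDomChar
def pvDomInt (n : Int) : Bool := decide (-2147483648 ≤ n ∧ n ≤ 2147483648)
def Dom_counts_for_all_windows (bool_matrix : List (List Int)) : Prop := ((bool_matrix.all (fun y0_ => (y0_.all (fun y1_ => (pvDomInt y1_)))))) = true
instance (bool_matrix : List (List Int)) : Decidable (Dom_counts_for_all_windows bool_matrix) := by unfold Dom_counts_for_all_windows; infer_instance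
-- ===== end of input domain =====

set_option maxRecDepth 8000

-- B replaces A's per-left-endpoint rescan of the matrix (O(R*C^2)) by one column sweep
-- maintaining per-row nonzero-run lengths plus a histogram/suffix-sum per column
-- (O(R*C + C^2)); same return value on every input where A returns (a timing run
-- measured B faster).

-- ===== PORT A =====
-- step of A's inner `for r in range(l, C)` loop: update the 0/1 `active` mask row by row,
-- then write counts[l][r] = sum(active)
def stepA (M : List (List Int)) (l : Nat) (st : List (List Int) × List Int) (r : Nat) :
    List (List Int) × List Int :=
  let active := (List.range M.length).foldl
    (fun a i => a.set i (if a.getD i 0 ≠ 0 ∧ (M.getD i []).getD r 0 ≠ 0 then 1 else 0)) st.2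
  (st.1.set l ((st.1.getD l []).set r active.sum), active)

def counts_for_all_windows (bool_matrix : List (List Int)) : List (List Int) :=
  if bool_matrix = [] then []
  else
    let C := bool_matrix.headI.length
    (List.range C).foldl
      (fun counts l =>
        ((List.range' l (C - l)).foldl (stepA bool_matrix l)
          (counts, List.replicate bool_matrix.length 1)).1)
      ((List.range C).map (fun _ => List.replicate C (0 : Int)))

-- ===== PORT B =====
-- step of B's `for l in range(r + 1)` loop: running suffix sum of the histogram,
-- written into counts[l][r]
def stepB_inner (hist : List Int) (r : Nat) (st2 : List (List Int) × Int) (l : Nat) :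
    List (List Int) × Int :=
  let suf := st2.2 + hist.getD (r + 1 - l) 0
  (st2.1.set l ((st2.1.getD l []).set r suf), suf)

-- step of B's `for r in range(C)` loop: extend per-row streaks, histogram them,
-- then sweep the suffix sums into column r of counts
def stepB (M : List (List Int)) (st : List (List Int) × List Nat) (r : Nat) :
    List (List Int) × List Nat :=
  let streak := List.zipWith (fun s row => if (row : List Int).getD r 0 ≠ 0 then s + 1 else 0) st.2 M
  let hist := streak.foldl (fun h s => h.set s (h.getD s 0 + 1)) (List.replicate (r + 2) (0 : Int))
  (((List.range (r + 1)).foldl (stepB_inner hist r) (st.1, 0)).1, streak)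

def counts_for_all_windows_alt (bool_matrix : List (List Int)) : List (List Int) :=
  if bool_matrix = [] then []
  else
    let C := bool_matrix.headI.length
    ((List.range C).foldl (stepB bool_matrix)
      ((List.range C).map (fun _ => List.replicate C (0 : Int)),
       List.replicate bool_matrix.length 0)).1

-- ===== PRECONDITION & SPEC =====
-- Pre_ excludes exactly the ragged matrices in which some row is shorter than the first
-- row: there Python A (and B alike) raises IndexError on bool_matrix[i][r].
def Pre_counts_for_all_windows (bool_matrix : List (List Int)) : Prop :=
  ∀ row ∈ bool_matrix, bool_matrix.headI.length ≤ row.length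

instance (bool_matrix : List (List Int)) : Decidable (Pre_counts_for_all_windows bool_matrix) := by
  unfold Pre_counts_for_all_windows; infer_instance

def pvWitness_counts_for_all_windows : List (List Int) := [[1, 0, 1], [1, 1, 1]]

def Spec_counts_for_all_windows (bool_matrix : List (List Int)) (out : List (List Int)) : Prop :=
  out = counts_for_all_windows_alt bool_matrix

instance (bool_matrix : List (List Int)) (out : List (List Int)) :
    Decidable (Spec_counts_for_all_windows bool_matrix out) := by
  unfold Spec_counts_for_all_windows; infer_instance

-- ===== CLAIM (what is proved, stated in full; the proofs are below) =====
def Claim_equal_counts_for_all_windows : Prop :=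
  ∀ (bool_matrix : List (List Int)), Dom_counts_for_all_windows bool_matrix →
    Pre_counts_for_all_windows bool_matrix →
    Spec_counts_for_all_windows bool_matrix (counts_for_all_windows bool_matrix)

-- ===== LEMMAS AND PROOFS =====

-- the C×C grid whose cell (l, c) is f l c
def mkGrid (C : Nat) (f : Nat → Nat → Int) : List (List Int) :=
  (List.range C).map (fun l => (List.range C).map (fun c => f l c))

-- row is all-nonzero on columns l, l+1, …, l+k-1
def winB (row : List Int) (l k : Nat) : Bool :=
  (List.range' l k).all (fun c => row.getD c 0 != 0)

-- number of rows of M that are all-nonzero on the window [l, l+k-1]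
def gcount (M : List (List Int)) (l k : Nat) : Int :=
  (M.countP (fun row => winB row l k) : Int)

-- length of the run of nonzeros in `row` ending just before column r
def sAt (row : List Int) : Nat → Nat
  | 0 => 0
  | r + 1 => if row.getD r 0 ≠ 0 then sAt row r + 1 else 0

lemma mkGrid_congr {C : Nat} {f g : Nat → Nat → Int}
    (h : ∀ x y, x < C → y < C → f x y = g x y) : mkGrid C f = mkGrid C g := by
  unfold mkGrid
  refine List.map_congr_left (fun x hx => ?_)
  refine List.map_congr_left (fun y hy => ?_)
  exact h x y (List.mem_range.mp hx) (List.mem_range.mp hy)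

lemma map_range_set {α : Type} (C r : Nat) (g : Nat → α) (v : α) :
    ((List.range C).map g).set r v = (List.range C).map (fun y => if y = r then v else g y) := by
  apply List.ext_getElem
  · simp
  · intro i hi hi'
    simp only [List.getElem_set, List.getElem_map, List.getElem_range]
    by_cases hir : i = r
    · simp [hir]
    · rw [if_neg (by omega), if_neg hir]

lemma mkGrid_getD {C l : Nat} (f : Nat → Nat → Int) (hl : l < C) :
    (mkGrid C f).getD l [] = (List.range C).map (f l) := by
  rw [List.getD_eq_getElem _ _ (by simpa [mkGrid] using hl)]
  simp [mkGrid]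

lemma mkGrid_set {C l r : Nat} (f : Nat → Nat → Int) (v : Int) (hl : l < C) (hr : r < C) :
    (mkGrid C f).set l (((mkGrid C f).getD l []).set r v)
      = mkGrid C (fun x y => if x = l ∧ y = r then v else f x y) := by
  rw [mkGrid_getD f hl, map_range_set]
  unfold mkGrid
  rw [map_range_set]
  refine List.map_congr_left (fun x hx => ?_)
  by_cases hxl : x = l
  · subst hxl
    simp only [if_pos rfl]
    exact List.map_congr_left (fun y hy => by by_cases hyr : y = r <;> simp [hyr])
  · rw [if_neg hxl]
    exact List.map_congr_left (fun y hy => by simp [hxl])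

lemma mkGrid_zero (C : Nat) :
    (List.range C).map (fun _ => List.replicate C (0 : Int)) = mkGrid C (fun _ _ => 0) := by
  unfold mkGrid
  refine List.map_congr_left (fun x hx => ?_)
  show List.replicate C (0:Int) = (List.range C).map (fun _ => (0:Int))
  simp

lemma foldl_map_succ_cons {β : Type} (G G' : List β → Nat → List β) (c : β)
    (h : ∀ a i, G (c :: a) (i + 1) = c :: G' a i) :
    ∀ (is : List Nat) (a : List β), (is.map Nat.succ).foldl G (c :: a) = c :: is.foldl G' a := by
  intro is
  induction is with
  | nil => intro a; simp
  | cons i is ih => intro a; simp only [List.map_cons, List.foldl_cons, h]; exact ih _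

lemma fold_set_zipWith {α β : Type} (f : β → α → β) (d : β) (dx : α) :
    ∀ (xs : List α) (a : List β), a.length = xs.length →
      (List.range xs.length).foldl (fun acc i => acc.set i (f (acc.getD i d) (xs.getD i dx))) a
        = List.zipWith f a xs := by
  intro xs
  induction xs with
  | nil => intro a ha; simp at ha; simp [ha]
  | cons x xs ih =>
    intro a ha
    cases a with
    | nil => simp at ha
    | cons b a' =>
      simp only [List.length_cons] at ha
      rw [List.length_cons, List.range_succ_eq_map, List.foldl_cons]
      have h0 : (b :: a').set 0 (f ((b :: a').getD 0 d) ((x :: xs).getD 0 dx)) = f b x :: a' := by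
        simp
      rw [h0, foldl_map_succ_cons _
        (fun acc i => acc.set i (f (acc.getD i d) (xs.getD i dx))) (f b x)
        (by intro a i; simp)]
      rw [ih a' (by omega)]
      simp

lemma sum_map_ind (p : List Int → Bool) :
    ∀ (M : List (List Int)),
      (M.map (fun row => if p row = true then (1 : Int) else 0)).sum = (M.countP p : Int) := by
  intro M
  induction M with
  | nil => simp
  | cons row M ih =>
    simp only [List.map_cons, List.sum_cons, List.countP_cons, ih]
    by_cases h : p row = true <;> simp [h] <;> push_cast <;> ring

lemma getD_set_lt (l : List Int) (s k : Nat) (v : Int) (h : k < l.length) :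
    (l.set s v).getD k 0 = if s = k then v else l.getD k 0 := by
  rw [List.getD_eq_getElem _ _ (by simpa using h), List.getD_eq_getElem _ _ h, List.getElem_set]

lemma foldl_hist_length : ∀ (ss : List Nat) (h : List Int),
    (ss.foldl (fun h s => h.set s (h.getD s 0 + 1)) h).length = h.length := by
  intro ss
  induction ss with
  | nil => intro h; rfl
  | cons s ss ih => intro h; rw [List.foldl_cons, ih, List.length_set]

lemma foldl_hist_getD : ∀ (ss : List Nat) (h : List Int) (k : Nat), k < h.length →
    (ss.foldl (fun h s => h.set s (h.getD s 0 + 1)) h).getD k 0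
      = h.getD k 0 + (ss.countP (fun s => s == k) : Int) := by
  intro ss
  induction ss with
  | nil => intro h k hk; simp
  | cons s ss ih =>
    intro h k hk
    rw [List.foldl_cons, ih _ _ (by simpa using hk), getD_set_lt _ _ _ _ hk,
      List.countP_cons]
    by_cases hsk : s = k <;> simp [hsk] <;> push_cast <;> ring

lemma countP_ge_split : ∀ (ss : List Nat) (w : Nat),
    ss.countP (fun s => decide (w ≤ s))
      = ss.countP (fun s => decide (w + 1 ≤ s)) + ss.countP (fun s => s == w) := by
  intro ss
  induction ss with
  | nil => intro w; simp
  | cons s ss ih =>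
    intro w
    simp only [List.countP_cons]
    rw [ih w]
    by_cases h1 : w ≤ s <;> by_cases h2 : w + 1 ≤ s <;> by_cases h3 : s = w <;>
      simp [h1, h2, h3] <;> omega

lemma countP_ge_zero (ss : List Nat) (w : Nat) (hb : ∀ s ∈ ss, s < w) :
    ss.countP (fun s => decide (w ≤ s)) = 0 := by
  rw [List.countP_eq_zero]
  intro s hs
  simpa using Nat.not_le.mpr (hb s hs)

lemma sAt_le (row : List Int) : ∀ r, sAt row r ≤ r := by
  intro r
  induction r with
  | zero => simp [sAt]
  | succ r ih => rw [sAt]; split <;> omega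

lemma winB_concat (row : List Int) (l k : Nat) :
    winB row l (k + 1) = (winB row l k && (row.getD (l + k) 0 != 0)) := by
  unfold winB
  rw [show List.range' l (k+1) = List.range' l k ++ [l+k] by
    simpa using List.range'_concat (s := l) (n := k) (step := 1)]
  rw [List.all_append]
  simp

lemma win_sAt (row : List Int) : ∀ (r l : Nat), l ≤ r →
    (winB row l (r + 1 - l) = true ↔ r + 1 - l ≤ sAt row (r + 1)) := by
  intro r
  induction r with
  | zero =>
    intro l hl
    interval_cases l
    rw [show (0 + 1 - 0) = 0 + 1 by rfl, winB_concat, sAt]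
    simp [winB, sAt]
    by_cases h0 : row[0]?.getD 0 = 0 <;> simp [h0]
  | succ r ih =>
    intro l hl
    rw [sAt]
    by_cases h0 : row[r + 1]?.getD 0 = 0
    · rw [if_neg (by simp [List.getD_eq_getElem?_getD, h0])]
      constructor
      · intro hw
        exfalso
        have hm : (r + 1) ∈ List.range' l (r + 1 + 1 - l) := by
          rw [List.mem_range'_1]
          omega
        have := (List.all_eq_true.mp hw) _ hm
        simp [List.getD_eq_getElem?_getD, h0] at this
      · intro hle
        exact absurd hle (by omega)
    · rw [if_pos (by simp [List.getD_eq_getElem?_getD, h0])]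
      by_cases hlr : l = r + 1
      · subst hlr
        rw [show (r + 1 + 1 - (r + 1)) = 0 + 1 by omega, winB_concat]
        simp [winB, List.getD_eq_getElem?_getD, h0]
      · have hl' : l ≤ r := by omega
        rw [show (r + 1 + 1 - l) = (r + 1 - l) + 1 by omega, winB_concat,
          show l + (r + 1 - l) = r + 1 by omega, Bool.and_eq_true]
        have hI := ih l hl'
        constructor
        · rintro ⟨hw, _⟩
          have := hI.mp hw
          omega
        · intro hle
          exact ⟨hI.mpr (by omega), by simp [List.getD_eq_getElem?_getD, h0]⟩

lemma zipWith_same' {α β : Type} (f : α → α → β) :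
    ∀ (l : List α), List.zipWith f l l = l.map (fun a => f a a) := by
  intro l
  induction l with
  | nil => rfl
  | cons a l ih => simp [ih]

-- ===== A-side characterization =====

lemma A_inner (M : List (List Int)) (C l : Nat) (hl : l < C) :
    ∀ (k : Nat) (f : Nat → Nat → Int), l + k ≤ C →
      (List.range' l k).foldl (stepA M l)
          (mkGrid C f, M.map (fun row => if winB row l 0 then (1 : Int) else 0))
        = (mkGrid C (fun x y => if x = l ∧ l ≤ y ∧ y < l + k then gcount M x (y + 1 - x) else f x y),
           M.map (fun row => if winB row l k then (1 : Int) else 0)) := by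
  intro k
  induction k with
  | zero =>
    intro f hk
    simp only [List.range'_zero, List.foldl_nil]
    refine Prod.ext ?_ rfl
    exact mkGrid_congr (fun x y hx hy => by rw [if_neg (by rintro ⟨_, h1, h2⟩; omega)])
  | succ k ih =>
    intro f hk
    rw [show List.range' l (k + 1) = List.range' l k ++ [l + k] by
        simpa using List.range'_concat (s := l) (n := k) (step := 1),
      List.foldl_append, ih f (by omega), List.foldl_cons, List.foldl_nil]
    have hlen : (M.map (fun row => if winB row l k then (1 : Int) else 0)).length = M.length := by
      simp
    have hact : (List.range M.length).foldl
        (fun a i => a.set i (if a.getD i 0 ≠ 0 ∧ (M.getD i []).getD (l + k) 0 ≠ 0 then 1 else 0))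
        (M.map (fun row => if winB row l k then (1 : Int) else 0))
        = M.map (fun row => if winB row l (k + 1) then (1 : Int) else 0) := by
      rw [fold_set_zipWith
        (fun a row => if a ≠ 0 ∧ (row : List Int).getD (l + k) 0 ≠ 0 then (1 : Int) else 0)
        0 [] M _ hlen]
      rw [List.zipWith_map_left, zipWith_same']
      refine List.map_congr_left (fun row hrow => ?_)
      rw [winB_concat]
      by_cases h1 : winB row l k <;> by_cases h2 : row.getD (l + k) 0 = 0 <;> simp [h1, h2]
    simp only [stepA]
    rw [hact, sum_map_ind, mkGrid_set _ _ hl (show l + k < C by omega)]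
    refine Prod.ext ?_ rfl
    apply mkGrid_congr
    intro x y hx hy
    by_cases h1 : x = l ∧ y = l + k
    · obtain ⟨rfl, rfl⟩ := h1
      rw [if_pos ⟨rfl, rfl⟩, if_pos ⟨rfl, by omega, by omega⟩, show x + k + 1 - x = k + 1 by omega]
      rfl
    · rw [if_neg h1]
      by_cases h2 : x = l ∧ l ≤ y ∧ y < l + k
      · rw [if_pos h2, if_pos ⟨h2.1, h2.2.1, by omega⟩]
      · rw [if_neg h2, if_neg ?_]
        rintro ⟨rfl, hy1, hy2⟩
        rcases Nat.lt_or_ge y (x + k) with h3 | h3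
        · exact h2 ⟨rfl, hy1, h3⟩
        · exact h1 ⟨rfl, by omega⟩

lemma A_outer (M : List (List Int)) (C : Nat) :
    ∀ l, l ≤ C →
      (List.range l).foldl
          (fun counts l' =>
            ((List.range' l' (C - l')).foldl (stepA M l') (counts, List.replicate M.length 1)).1)
          (mkGrid C (fun _ _ => 0))
        = mkGrid C (fun x y => if x < l ∧ x ≤ y then gcount M x (y + 1 - x) else 0) := by
  intro l
  induction l with
  | zero =>
    intro h0
    simp only [List.range_zero, List.foldl_nil]
    exact mkGrid_congr (fun x y hx hy => by rw [if_neg (by rintro ⟨h1, _⟩; omega)])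
  | succ l ih =>
    intro h
    rw [List.range_succ, List.foldl_append, ih (by omega), List.foldl_cons, List.foldl_nil]
    have hrepl : List.replicate M.length (1 : Int)
        = M.map (fun row => if winB row l 0 then (1 : Int) else 0) := by
      rw [show (fun row => if winB row l 0 then (1 : Int) else 0) = (fun _ : List Int => (1 : Int))
          from funext (fun row => by simp [winB])]
      simp
    rw [hrepl, A_inner M C l (by omega) (C - l) _ (by omega)]
    dsimp only
    apply mkGrid_congr
    intro x y hx hy
    by_cases h1 : x = l ∧ l ≤ y
    · obtain ⟨rfl, h2⟩ := h1
      rw [if_pos ⟨rfl, h2, by omega⟩, if_pos ⟨by omega, h2⟩]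
    · rw [if_neg (by rintro ⟨rfl, h2, _⟩; exact h1 ⟨rfl, h2⟩)]
      by_cases h2 : x < l ∧ x ≤ y
      · rw [if_pos h2, if_pos ⟨by omega, h2.2⟩]
      · rw [if_neg h2, if_neg ?_]
        rintro ⟨hxl, hxy⟩
        rcases Nat.lt_or_ge x l with h3 | h3
        · exact h2 ⟨h3, hxy⟩
        · exact h1 ⟨by omega, by omega⟩

lemma A_char (M : List (List Int)) (h : ¬ M = []) :
    counts_for_all_windows M
      = mkGrid M.headI.length
          (fun x y => if x ≤ y then gcount M x (y + 1 - x) else 0) := by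
  simp only [counts_for_all_windows, if_neg h]
  rw [mkGrid_zero, A_outer M M.headI.length M.headI.length (le_refl _)]
  apply mkGrid_congr
  intro x y hx hy
  by_cases h1 : x ≤ y
  · rw [if_pos ⟨hx, h1⟩, if_pos h1]
  · rw [if_neg (by rintro ⟨_, h2⟩; exact h1 h2), if_neg h1]

-- ===== B-side characterization =====

lemma B_inner (hist : List Int) (ss : List Nat) (r C : Nat) (hr : r < C)
    (hlen : hist.length = r + 2)
    (hhist : ∀ k, k < r + 2 → hist.getD k 0 = (ss.countP (fun s => s == k) : Int))
    (hb : ∀ s ∈ ss, s ≤ r + 1) :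
    ∀ (j : Nat) (f : Nat → Nat → Int), j ≤ r + 1 →
      (List.range j).foldl (stepB_inner hist r) (mkGrid C f, 0)
        = (mkGrid C (fun x y =>
              if y = r ∧ x < j then (ss.countP (fun s => decide (r + 1 - x ≤ s)) : Int) else f x y),
           (ss.countP (fun s => decide (r + 2 - j ≤ s)) : Int)) := by
  intro j
  induction j with
  | zero =>
    intro f hj
    simp only [List.range_zero, List.foldl_nil]
    refine Prod.ext ?_ ?_
    · exact mkGrid_congr (fun x y hx hy => by rw [if_neg (by rintro ⟨_, h1⟩; omega)])
    · rw [countP_ge_zero ss (r + 2 - 0) (fun s hs => by have := hb s hs; omega)]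
      rfl
  | succ j ih =>
    intro f hj
    rw [List.range_succ, List.foldl_append, ih f (by omega), List.foldl_cons, List.foldl_nil]
    simp only [stepB_inner]
    have hsuf : (ss.countP (fun s => decide (r + 2 - j ≤ s)) : Int) + hist.getD (r + 1 - j) 0
        = (ss.countP (fun s => decide (r + 1 - j ≤ s)) : Int) := by
      rw [hhist (r + 1 - j) (by omega),
        show (r + 2 - j) = (r + 1 - j) + 1 by omega,
        countP_ge_split ss (r + 1 - j)]
      push_cast
      ring
    rw [hsuf, mkGrid_set _ _ (show j < C by omega) hr]
    refine Prod.ext ?_ ?_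
    · apply mkGrid_congr
      intro x y hx hy
      by_cases h1 : x = j ∧ y = r
      · obtain ⟨rfl, rfl⟩ := h1
        rw [if_pos ⟨rfl, rfl⟩, if_pos ⟨rfl, by omega⟩]
      · rw [if_neg (by rintro ⟨rfl, rfl⟩; exact h1 ⟨rfl, rfl⟩)]
        by_cases h2 : y = r ∧ x < j
        · rw [if_pos h2, if_pos ⟨h2.1, by omega⟩]
        · rw [if_neg h2, if_neg ?_]
          rintro ⟨rfl, hx2⟩
          rcases Nat.lt_or_ge x j with h3 | h3
          · exact h2 ⟨rfl, h3⟩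
          · exact h1 ⟨by omega, rfl⟩
    · simp only [show r + 2 - (j + 1) = r + 1 - j by omega]

lemma B_outer (M : List (List Int)) (C : Nat) :
    ∀ r, r ≤ C →
      (List.range r).foldl (stepB M)
          (mkGrid C (fun _ _ => 0), List.replicate M.length 0)
        = (mkGrid C (fun x y => if y < r ∧ x ≤ y then gcount M x (y + 1 - x) else 0),
           M.map (fun row => sAt row r)) := by
  intro r
  induction r with
  | zero =>
    intro h0
    simp only [List.range_zero, List.foldl_nil]
    refine Prod.ext ?_ ?_
    · exact mkGrid_congr (fun x y hx hy => by rw [if_neg (by rintro ⟨h1, _⟩; omega)])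
    · rw [show (fun row : List Int => sAt row 0) = (fun _ : List Int => 0)
          from funext (fun row => rfl)]
      simp
  | succ r ih =>
    intro h
    have hrC : r < C := by omega
    rw [List.range_succ, List.foldl_append, ih (by omega), List.foldl_cons, List.foldl_nil]
    simp only [stepB]
    have hstreak : List.zipWith (fun s row => if (row : List Int).getD r 0 ≠ 0 then s + 1 else 0)
        (M.map (fun row => sAt row r)) M = M.map (fun row => sAt row (r + 1)) := by
      rw [List.zipWith_map_left, zipWith_same']
      exact List.map_congr_left (fun row hrow => by rw [sAt])
    rw [hstreak]
    have hlen : ((M.map (fun row => sAt row (r + 1))).foldl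
        (fun h s => h.set s (h.getD s 0 + 1)) (List.replicate (r + 2) (0 : Int))).length = r + 2 := by
      rw [foldl_hist_length]
      simp
    have hhist : ∀ k, k < r + 2 →
        ((M.map (fun row => sAt row (r + 1))).foldl
          (fun h s => h.set s (h.getD s 0 + 1)) (List.replicate (r + 2) (0 : Int))).getD k 0
        = ((M.map (fun row => sAt row (r + 1))).countP (fun s => s == k) : Int) := by
      intro k hk
      rw [foldl_hist_getD _ _ _ (by simpa using hk)]
      simp
    have hb : ∀ s ∈ M.map (fun row => sAt row (r + 1)), s ≤ r + 1 := by
      intro s hs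
      obtain ⟨row, _, rfl⟩ := List.mem_map.mp hs
      exact sAt_le row (r + 1)
    rw [B_inner _ _ r C hrC hlen hhist hb (r + 1) _ (le_refl _)]
    refine Prod.ext ?_ rfl
    dsimp only
    apply mkGrid_congr
    intro x y hx hy
    have hcnt : x ≤ r →
        ((M.map (fun row => sAt row (r + 1))).countP (fun s => decide (r + 1 - x ≤ s)) : Int)
          = gcount M x (r + 1 - x) := by
      intro hxr
      unfold gcount
      rw [List.countP_map, List.countP_congr (fun row hrow => ?_)]
      simp only [Function.comp]
      rw [show (decide (r + 1 - x ≤ sAt row (r + 1)) = true) ↔ (r + 1 - x ≤ sAt row (r + 1))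
          from decide_eq_true_iff]
      exact (win_sAt row r x hxr).symm
    by_cases h1 : y = r ∧ x ≤ r
    · obtain ⟨rfl, hx2⟩ := h1
      rw [if_pos ⟨rfl, by omega⟩, if_pos ⟨by omega, hx2⟩, hcnt hx2]
    · rw [if_neg (by rintro ⟨rfl, hx2⟩; exact h1 ⟨rfl, by omega⟩)]
      by_cases h2 : y < r ∧ x ≤ y
      · rw [if_pos h2, if_pos ⟨by omega, h2.2⟩]
      · rw [if_neg h2, if_neg ?_]
        rintro ⟨hy2, hx2⟩
        rcases Nat.lt_or_ge y r with h3 | h3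
        · exact h2 ⟨h3, hx2⟩
        · exact h1 ⟨by omega, by omega⟩

lemma B_char (M : List (List Int)) (h : ¬ M = []) :
    counts_for_all_windows_alt M
      = mkGrid M.headI.length
          (fun x y => if x ≤ y then gcount M x (y + 1 - x) else 0) := by
  simp only [counts_for_all_windows_alt, if_neg h]
  rw [mkGrid_zero, B_outer M M.headI.length M.headI.length (le_refl _)]
  apply mkGrid_congr
  intro x y hx hy
  by_cases h1 : x ≤ y
  · rw [if_pos ⟨hy, h1⟩, if_pos h1]
  · rw [if_neg (by rintro ⟨_, h2⟩; exact h1 h2), if_neg h1]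

-- ===== VERDICT (by name: the statement is the Claim_ definition above) =====
theorem counts_for_all_windows_spec : Claim_equal_counts_for_all_windows := by
  intro M _ _
  unfold Spec_counts_for_all_windows
  by_cases h : M = []
  · subst h; rfl
  · rw [A_char M h, B_char M h]
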